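-- pv_equiv track=rewrite | github.com/lochel/AdventOfCode | 2023/12.py | solved
-- ===== SOURCE A (Python) =====
-- def solved(a, b, c):
--   count = 0
--   p = []
--   for i,x in enumerate(a):
--     inside = x == '#' or i in c
--     if inside:
--       count += 1
--     elif count != 0:
--       p.append(count)
--       count = 0
--   if count != 0:
--     p.append(count)
--   return p == b
-- ===== SOURCE B (Python) =====
-- def solved(a, b, c):
--   mask = ''.join('#' if x == '#' or i in c else '.' for i, x in enumerate(a))
--   runs = [len(chunk) for chunk in mask.split('.') if chunk]
--   return runs == b
-- ===== Notes on version B (the rewrite author's own statement) =====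
-- stated objective: idiomatic
-- what changed: Replaces the single stateful counter loop by a two-phase pipeline: build a '#'/'.' mask in one pass, then take the lengths of the non-empty chunks of mask.split('.') and compare to b.
import Mathlib
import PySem

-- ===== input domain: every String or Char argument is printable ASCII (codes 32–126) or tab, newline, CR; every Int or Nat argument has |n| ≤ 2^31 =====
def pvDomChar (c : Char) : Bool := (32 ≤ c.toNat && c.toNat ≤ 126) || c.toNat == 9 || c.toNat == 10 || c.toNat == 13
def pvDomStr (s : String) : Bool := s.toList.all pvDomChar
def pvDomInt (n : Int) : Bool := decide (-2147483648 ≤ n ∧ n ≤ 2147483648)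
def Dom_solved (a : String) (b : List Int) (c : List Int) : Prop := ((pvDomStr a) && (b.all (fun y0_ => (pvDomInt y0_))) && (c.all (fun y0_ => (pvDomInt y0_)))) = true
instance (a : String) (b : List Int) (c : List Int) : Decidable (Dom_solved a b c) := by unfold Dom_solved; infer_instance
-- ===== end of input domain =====

-- B replaces A's stateful counter loop by a two-phase pipeline (build a '#'/'.' mask,
-- then split it on '.' and take non-empty chunk lengths); objective: idiomatic, same cost.

-- ===== PORT A =====
-- A's loop body (count, p are the state; ix = (i, x) from enumerate(a))
def pvStepA (c : List Int) (s : Int × List Int) (ix : Int × Char) : Int × List Int :=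
  if ix.2 == '#' || c.contains ix.1 then (s.1 + 1, s.2)
  else if s.1 != 0 then (0, s.2 ++ [s.1]) else s

def solved (a : String) (b : List Int) (c : List Int) : Bool :=
  let st := (PySem.List.enumerate a.toList).foldl (pvStepA c) ((0 : Int), ([] : List Int))
  let p := if st.1 != 0 then st.2 ++ [st.1] else st.2
  p == b

-- ===== PORT B =====
-- hand port of str.split('.') over the character list (exact: splits at every '.', keeping empty chunks)
def splitDot : List Char → List (List Char)
  | [] => [[]]
  | ch :: t =>
    if ch == '.' then [] :: splitDot t
    else
      match splitDot t with
      | [] => [[ch]]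
      | g :: gs => (ch :: g) :: gs

def solved_alt (a : String) (b : List Int) (c : List Int) : Bool :=
  let mask := (PySem.List.enumerate a.toList).map
    (fun ix => if ix.2 == '#' || c.contains ix.1 then '#' else '.')
  let runs := ((splitDot mask).filter (fun g => !g.isEmpty)).map (fun g => (g.length : Int))
  runs == b

-- ===== PRECONDITION & SPEC =====
def Spec_solved (a : String) (b : List Int) (c : List Int) (out : Bool) : Prop := out = solved_alt a b c
instance (a : String) (b : List Int) (c : List Int) (out : Bool) : Decidable (Spec_solved a b c out) := by unfold Spec_solved; infer_instance

-- ===== CLAIM (what is proved, stated in full; the proofs are below) =====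
def Claim_equal_solved : Prop := ∀ (a : String) (b : List Int) (c : List Int), Dom_solved a b c → Spec_solved a b c (solved a b c)

-- ===== LEMMAS AND PROOFS =====

-- the run lengths of a boolean mask, with cnt the length of the run currently open
def runsFrom : Int → List Bool → List Int
  | cnt, [] => if cnt != 0 then [cnt] else []
  | cnt, true :: t => runsFrom (cnt + 1) t
  | cnt, false :: t => if cnt != 0 then cnt :: runsFrom 0 t else runsFrom 0 t

def charOf (b : Bool) : Char := if b then '#' else '.'

lemma splitDot_ne_nil (m : List Char) : splitDot m ≠ [] := by
  cases m with
  | nil => simp [splitDot]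
  | cons ch t =>
    simp only [splitDot]
    split
    · simp
    · cases h : splitDot t <;> simp

-- A's loop, started at any (cnt, p) and finalized, appends runsFrom cnt of the mask.
lemma foldA (c : List Int) (l : List (Int × Char)) : ∀ (cnt : Int) (p : List Int),
    (let st := l.foldl (pvStepA c) (cnt, p);
     if st.1 != 0 then st.2 ++ [st.1] else st.2)
    = p ++ runsFrom cnt (l.map (fun ix => ix.2 == '#' || c.contains ix.1)) := by
  induction l with
  | nil =>
    intro cnt p
    by_cases h : cnt = 0 <;> simp [runsFrom, h]
  | cons hd t ih =>
    intro cnt p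
    by_cases hc : (hd.2 == '#' || c.contains hd.1) = true
    · simp only [List.foldl_cons, pvStepA, List.map_cons, hc, if_true, runsFrom]
      exact ih (cnt + 1) p
    · replace hc : (hd.2 == '#' || c.contains hd.1) = false := by
        simpa using hc
      by_cases h0 : cnt = 0
      · subst h0
        simp only [List.foldl_cons, pvStepA, List.map_cons, hc, Bool.false_eq_true,
          if_false, runsFrom]
        simpa using ih 0 p
      · simp only [List.foldl_cons, pvStepA, List.map_cons, hc, Bool.false_eq_true,
          if_false, runsFrom]
        have hne : (cnt != 0) = true := by simpa using h0
        simp only [hne, if_true]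
        simpa [List.append_assoc] using ih 0 (p ++ [cnt])

-- splitDot on the rendered mask computes runsFrom, up to adding cnt to the first chunk
-- and filtering the zero lengths.
lemma splitB (bs : List Bool) : ∀ (cnt : Int),
    runsFrom cnt bs =
      ((cnt + ((splitDot (bs.map charOf)).headI.length : Int))
        :: ((splitDot (bs.map charOf)).tail.map (fun g => (g.length : Int)))).filter
        (fun n => n != 0) := by
  induction bs with
  | nil =>
    intro cnt
    by_cases h : cnt = 0 <;> simp [runsFrom, splitDot, h]
  | cons hd t ih =>
    intro cnt
    cases hd with
    | true =>
      rcases hsp : splitDot (t.map charOf) with _ | ⟨g, gs⟩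
      · exact absurd hsp (splitDot_ne_nil _)
      · have h := ih (cnt + 1)
        rw [hsp] at h
        simp only [runsFrom, h, List.map_cons, charOf, if_true, splitDot, hsp]
        rw [show (('#' : Char) == '.') = false from rfl]
        simp only [Bool.false_eq_true, if_false, List.headI, List.tail]
        have hlen : (cnt + ((('#' :: g).length : Nat) : Int)) = cnt + 1 + (g.length : Int) := by
          push_cast [List.length_cons]
          ring
        rw [hlen]
    | false =>
      rcases hsp : splitDot (t.map charOf) with _ | ⟨g, gs⟩
      · exact absurd hsp (splitDot_ne_nil _)
      · have := ih 0
        rw [hsp] at this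
        by_cases h0 : cnt = 0 <;>
          simp [runsFrom, this, List.map_cons, charOf, splitDot, hsp, h0]

-- filter non-empty then take lengths = take lengths then filter nonzero
lemma lenFilter (L : List (List Char)) :
    (L.filter (fun g => !g.isEmpty)).map (fun g => (g.length : Int))
      = (L.map (fun g => (g.length : Int))).filter (fun n => n != 0) := by
  induction L with
  | nil => simp
  | cons g gs ih =>
    cases g with
    | nil => simpa using ih
    | cons x xs =>
      simp [List.filter_cons, ih]
      omega

-- the two masks agree
lemma mask_eq (l : List (Int × Char)) (c : List Int) :
    l.map (fun ix => if ix.2 == '#' || c.contains ix.1 then '#' else '.')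
      = (l.map (fun ix => ix.2 == '#' || c.contains ix.1)).map charOf := by
  simp [List.map_map, Function.comp, charOf]

lemma solved_eq_alt (a : String) (b : List Int) (c : List Int) :
    solved a b c = solved_alt a b c := by
  unfold solved solved_alt
  dsimp only
  rw [mask_eq]
  set bs := (PySem.List.enumerate a.toList).map (fun ix => ix.2 == '#' || c.contains ix.1) with hbs
  rw [foldA, lenFilter]
  rcases hsp : splitDot (bs.map charOf) with _ | ⟨g, gs⟩
  · exact absurd hsp (splitDot_ne_nil _)
  · have := splitB bs 0
    rw [hsp] at this
    simp only [List.headI, List.tail] at this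
    simp only [List.map_cons]
    rw [this]
    norm_num

-- ===== VERDICT (by name: the statement is the Claim_ definition above) =====
theorem solved_spec : Claim_equal_solved := by
  intro a b c _
  unfold Spec_solved
  exact solved_eq_alt a b c
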